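-- pv_equiv track=rewrite | github.com/harshithb3304/AI-PROJECT- | dfs.py | sub_grid_heuristic
-- ===== SOURCE A (Python) =====
-- from copy import deepcopy
--
-- def sub_grid_heuristic(sudoku_puzzle):
--     current_state = deepcopy(sudoku_puzzle)
--     n = len(sudoku_puzzle)
--     zero_count = [0 for _ in range(n)]
--     zero_index = [[] for _ in range(n)]
--
--     root = int(n ** 0.5)
--
--     # Count the number of zeros in each subgrid
--     for i in range(n):
--         for j in range(n):
--             if current_state[i][j] == 0:
--                 subgrid = (i // root) * root + j // root
--                 zero_count[subgrid] += 1
--                 zero_index[subgrid].append((i, j))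
--
--     # Set the count to a large value if the subgrid is filled
--     for i in range(n):
--         if zero_count[i] == 0:
--             zero_count[i] = n * n
--
--     # Find the subgrids with minimum number of zeros
--     min_count = min(zero_count)
--     min_indices = [i for i, count in enumerate(zero_count) if count == min_count]
--
--     return min_indices, zero_index
-- ===== SOURCE B (Python) =====
-- def sub_grid_heuristic(sudoku_puzzle):
--     n = len(sudoku_puzzle)
--     root = int(n ** 0.5)
--     # group the empty cells block by block (row-major within each block scan)
--     zero_index = [[(i, j)
--                    for i in range(n) for j in range(n)
--                    if sudoku_puzzle[i][j] == 0
--                    and (i // root) * root + j // root == b]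
--                   for b in range(n)]
--     zero_count = [len(cells) if cells else n * n for cells in zero_index]
--     min_count = min(zero_count)
--     min_indices = [b for b, c in enumerate(zero_count) if c == min_count]
--     return min_indices, zero_index
-- ===== Notes on version B (the rewrite author's own statement) =====
-- stated objective: alternative
-- what changed: A dispatches each cell into mutable zero_count/zero_index arrays it updates in place and then patches filled subgrids in a second pass; B builds zero_index directly by grouping the empty cells block by block and derives the counts as list lengths, with no mutable counters.
import Mathlib
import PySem

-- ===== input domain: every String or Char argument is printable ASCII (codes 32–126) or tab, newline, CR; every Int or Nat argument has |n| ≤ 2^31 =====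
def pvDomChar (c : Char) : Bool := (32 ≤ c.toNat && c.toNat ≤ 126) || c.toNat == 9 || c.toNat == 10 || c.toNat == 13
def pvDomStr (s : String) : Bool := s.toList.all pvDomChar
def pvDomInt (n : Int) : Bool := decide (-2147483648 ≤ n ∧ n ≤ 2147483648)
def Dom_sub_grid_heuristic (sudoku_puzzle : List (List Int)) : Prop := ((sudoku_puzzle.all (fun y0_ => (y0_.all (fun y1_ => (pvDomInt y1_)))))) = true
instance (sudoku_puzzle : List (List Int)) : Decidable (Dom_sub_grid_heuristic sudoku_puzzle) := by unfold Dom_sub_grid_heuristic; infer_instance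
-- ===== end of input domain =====

-- B replaces A's per-cell dispatch into mutable count/index arrays by grouping the empty
-- cells block by block (counts become list lengths); alternative decomposition, not faster.

-- ===== PORT A =====
-- int(n ** 0.5), kernel-computable (exact for any achievable list length)
def pvIsqrt (n : Nat) : Nat := (List.range (n + 1)).foldl (fun acc r => if r * r ≤ n then r else acc) 0

-- A's inner-loop body: 'if current_state[i][j] == 0: subgrid = …; zero_count[subgrid] += 1; zero_index[subgrid].append((i,j))'
def pvStepA (root : Nat) (p : List (List Int)) (i : Nat)
    (st : List Int × List (List (Int × Int))) (j : Nat) : List Int × List (List (Int × Int)) :=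
  if (p.getD i []).getD j 1 = 0 then
    let subgrid := (i / root) * root + j / root
    (st.1.set subgrid (st.1.getD subgrid 0 + 1),
     st.2.set subgrid (st.2.getD subgrid [] ++ [((i : Int), (j : Int))]))
  else st

def sub_grid_heuristic (sudoku_puzzle : List (List Int)) : List Int × (List (List (Int × Int))) :=
  let n := sudoku_puzzle.length
  let root := pvIsqrt n
  let st :=
    (List.range n).foldl (fun st i => (List.range n).foldl (pvStepA root sudoku_puzzle i) st)
      ((List.range n).map (fun _ => (0 : Int)), (List.range n).map (fun _ => ([] : List (Int × Int))))
  let zero_count :=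
    (List.range n).foldl (fun zc i => if zc.getD i 0 = 0 then zc.set i ((n : Int) * (n : Int)) else zc) st.1
  let min_count := (PySem.List.min? zero_count (fun x => x)).getD 0
  let min_indices := (PySem.List.enumerate zero_count).filterMap
    (fun q => if q.2 = min_count then some q.1 else none)
  (min_indices, st.2)

-- ===== PORT B =====
def sub_grid_heuristic_alt (sudoku_puzzle : List (List Int)) : List Int × (List (List (Int × Int))) :=
  let n := sudoku_puzzle.length
  let root := pvIsqrt n
  let zero_index :=
    (List.range n).map (fun b =>
      (List.range n).flatMap (fun i =>
        (List.range n).filterMap (fun j =>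
          if (sudoku_puzzle.getD i []).getD j 1 = 0 ∧ (i / root) * root + j / root = b
          then some ((i : Int), (j : Int)) else none)))
  let zero_count := zero_index.map (fun cells =>
    if cells = [] then (n : Int) * (n : Int) else (cells.length : Int))
  let min_count := (PySem.List.min? zero_count (fun x => x)).getD 0
  let min_indices := (PySem.List.enumerate zero_count).filterMap
    (fun q => if q.2 = min_count then some q.1 else none)
  (min_indices, zero_index)

-- ===== PRECONDITION & SPEC =====
-- Pre_ is exactly where Python A returns: a nonempty puzzle whose rows all have length ≥ n and
-- whose empty cells all fall in a subgrid index < n (otherwise A raises ValueError/IndexError).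
def Pre_sub_grid_heuristic (sudoku_puzzle : List (List Int)) : Prop :=
  sudoku_puzzle ≠ [] ∧
  (∀ row ∈ sudoku_puzzle, sudoku_puzzle.length ≤ row.length) ∧
  (∀ i < sudoku_puzzle.length, ∀ j < sudoku_puzzle.length,
    (sudoku_puzzle.getD i []).getD j 1 = 0 →
      (i / pvIsqrt sudoku_puzzle.length) * pvIsqrt sudoku_puzzle.length +
        j / pvIsqrt sudoku_puzzle.length < sudoku_puzzle.length)
instance (sudoku_puzzle : List (List Int)) : Decidable (Pre_sub_grid_heuristic sudoku_puzzle) := by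
  unfold Pre_sub_grid_heuristic; infer_instance
def pvWitness_sub_grid_heuristic : List (List Int) := [[1, 0], [0, 1]]

def Spec_sub_grid_heuristic (sudoku_puzzle : List (List Int)) (out : List Int × (List (List (Int × Int)))) : Prop := out = sub_grid_heuristic_alt sudoku_puzzle
instance (sudoku_puzzle : List (List Int)) (out : List Int × (List (List (Int × Int)))) : Decidable (Spec_sub_grid_heuristic sudoku_puzzle out) := by unfold Spec_sub_grid_heuristic; infer_instance

-- ===== CLAIM (what is proved, stated in full; the proofs are below) =====
def Claim_equal_sub_grid_heuristic : Prop := ∀ (sudoku_puzzle : List (List Int)), Dom_sub_grid_heuristic sudoku_puzzle → Pre_sub_grid_heuristic sudoku_puzzle → Spec_sub_grid_heuristic sudoku_puzzle (sub_grid_heuristic sudoku_puzzle)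

-- ===== LEMMAS AND PROOFS =====

def pvVal (p : List (List Int)) (i j : Nat) : Int := (p.getD i []).getD j 1
def pvSg (root : Nat) (c : Nat × Nat) : Nat := (c.1 / root) * root + c.2 / root
def pvCast (c : Nat × Nat) : Int × Int := ((c.1 : Int), (c.2 : Int))
def pvCells (p : List (List Int)) (n root : Nat) : List (Nat × Nat) :=
  (List.range n).flatMap (fun i =>
    (List.range n).filterMap (fun j => if pvVal p i j = 0 then some (i, j) else none))
def pvStep (root : Nat) (st : List Int × List (List (Int × Int))) (c : Nat × Nat) :
    List Int × List (List (Int × Int)) :=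
  let s := pvSg root c
  (st.1.set s (st.1.getD s 0 + 1), st.2.set s (st.2.getD s [] ++ [pvCast c]))

theorem foldl_if_filterMap {α β σ : Type} (l : List α) (g : σ → β → σ) (pcond : α → Prop)
    [DecidablePred pcond] (h : α → β) (st : σ) :
    l.foldl (fun st x => if pcond x then g st (h x) else st) st
      = (l.filterMap (fun x => if pcond x then some (h x) else none)).foldl g st := by
  induction l generalizing st with
  | nil => rfl
  | cons a t ih => by_cases hp : pcond a <;> simp [hp, ih]

theorem foldl_flatMap' {α β σ : Type} (l : List α) (g : α → List β) (f : σ → β → σ) (st : σ) :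
    (l.flatMap g).foldl f st = l.foldl (fun st x => (g x).foldl f st) st := by
  induction l generalizing st with
  | nil => rfl
  | cons a t ih => simp [List.flatMap_cons, List.foldl_append, ih]

theorem pvFold_length (root : Nat) (cs : List (Nat × Nat)) (st : List Int × List (List (Int × Int))) :
    (cs.foldl (pvStep root) st).1.length = st.1.length ∧
    (cs.foldl (pvStep root) st).2.length = st.2.length := by
  induction cs generalizing st with
  | nil => exact ⟨rfl, rfl⟩
  | cons c t ih => simpa [pvStep] using ih (pvStep root st c)

theorem pvFold_inv (root : Nat) (cs : List (Nat × Nat)) :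
    ∀ (count : List Int) (zi : List (List (Int × Int))) (k : Nat),
      k < count.length → k < zi.length →
      (cs.foldl (pvStep root) (count, zi)).1.getD k 0
          = count.getD k 0 + ((cs.filter (fun c => pvSg root c = k)).length : Int) ∧
      (cs.foldl (pvStep root) (count, zi)).2.getD k []
          = zi.getD k [] ++ (cs.filter (fun c => pvSg root c = k)).map pvCast := by
  induction cs with
  | nil => intro count zi k h1 h2; simp
  | cons c t ih =>
    intro count zi k h1 h2
    have hstep : (c :: t).foldl (pvStep root) (count, zi)
        = t.foldl (pvStep root) (pvStep root (count, zi) c) := rfl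
    rw [hstep]
    set s := pvSg root c with hs
    have h1' : k < (count.set s (count.getD s 0 + 1)).length := by simpa using h1
    have h2' : k < (zi.set s (zi.getD s [] ++ [pvCast c])).length := by simpa using h2
    have := ih (count.set s (count.getD s 0 + 1)) (zi.set s (zi.getD s [] ++ [pvCast c])) k h1' h2'
    rw [show pvStep root (count, zi) c
        = (count.set s (count.getD s 0 + 1), zi.set s (zi.getD s [] ++ [pvCast c])) from rfl]
    rcases this with ⟨hc, hz⟩
    by_cases hsk : s = k
    · subst hsk
      have hcg : (count.set s (count.getD s 0 + 1)).getD s 0 = count.getD s 0 + 1 := by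
        simp [List.getD, List.getElem?_set_self h1]
      have hzg : (zi.set s (zi.getD s [] ++ [pvCast c])).getD s [] = zi.getD s [] ++ [pvCast c] := by
        simp [List.getD, List.getElem?_set_self h2]
      constructor
      · rw [hc, hcg]; simp [hs]; ring
      · rw [hz, hzg]; simp [hs]
    · have hcg : (count.set s (count.getD s 0 + 1)).getD k 0 = count.getD k 0 := by
        simp [List.getD, List.getElem?_set_ne hsk]
      have hzg : (zi.set s (zi.getD s [] ++ [pvCast c])).getD k [] = zi.getD k [] := by
        simp [List.getD, List.getElem?_set_ne hsk]
      constructor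
      · rw [hc, hcg]; simp [← hs, hsk]
      · rw [hz, hzg]; simp [← hs, hsk]

theorem pvPass2_length (v : Int) (l : List Nat) (zc : List Int) :
    (l.foldl (fun zc i => if zc.getD i 0 = 0 then zc.set i v else zc) zc).length = zc.length := by
  induction l generalizing zc with
  | nil => rfl
  | cons a t ih =>
    simp only [List.foldl_cons]
    split
    · exact (ih (zc.set a v)).trans (by simp)
    · exact ih zc

theorem pvPass2_getD (v : Int) (m : Nat) (zc : List Int) :
    ∀ k, k < zc.length →
      ((List.range m).foldl (fun zc i => if zc.getD i 0 = 0 then zc.set i v else zc) zc).getD k 0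
        = if k < m ∧ zc.getD k 0 = 0 then v else zc.getD k 0 := by
  induction m with
  | zero => intro k hk; simp
  | succ m ih =>
    intro k hk
    rw [List.range_succ, List.foldl_append]
    set F := (List.range m).foldl (fun zc i => if zc.getD i 0 = 0 then zc.set i v else zc) zc with hF
    have hFlen : F.length = zc.length := pvPass2_length v _ zc
    simp only [List.foldl_cons, List.foldl_nil]
    by_cases hkm : k = m
    · subst hkm
      have hFk : F.getD k 0 = zc.getD k 0 := by rw [ih k hk]; simp
      by_cases hz : zc.getD k 0 = 0
      · rw [if_pos (by rw [hFk]; exact hz)]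
        have hset : (F.set k v).getD k 0 = v := by
          simp [List.getD, List.getElem?_set_self (by omega : k < F.length)]
        rw [hset, if_pos ⟨Nat.lt_succ_self k, hz⟩]
      · rw [if_neg (by rw [hFk]; exact hz), hFk, if_neg (by tauto)]
    · have hne : ¬ (m = k) := fun h => hkm h.symm
      have hgoal : (if F.getD m 0 = 0 then F.set m v else F).getD k 0 = F.getD k 0 := by
        split
        · simp [List.getD, List.getElem?_set_ne hne]
        · rfl
      rw [hgoal, ih k hk]
      have hiff : (k < m) ↔ (k < m + 1) := by omega
      by_cases hz : zc.getD k 0 = 0 <;> simp [hiff]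

theorem filterMap_if_and {α β γ : Type} (l : List α) (P : α → Prop) [DecidablePred P]
    (Q : β → Prop) [DecidablePred Q] (h : α → β) (f : β → γ) :
    l.filterMap (fun x => if P x ∧ Q (h x) then some (f (h x)) else none)
      = ((l.filterMap (fun x => if P x then some (h x) else none)).filter
          (fun c => decide (Q c))).map f := by
  induction l with
  | nil => rfl
  | cons a t ih =>
    by_cases hP : P a
    · by_cases hQ : Q (h a) <;> simp [hP, hQ, ih]
    · simp [hP, ih]

theorem map_filter_flatMap {α β γ : Type} (l : List α) (g : α → List β) (Q : β → Bool) (f : β → γ) :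
    ((l.flatMap g).filter Q).map f = l.flatMap (fun x => ((g x).filter Q).map f) := by
  induction l with
  | nil => rfl
  | cons a t ih => simp [List.filter_append, ih]

theorem main_fold (p : List (List Int)) :
    (List.range p.length).foldl
      (fun st i => (List.range p.length).foldl (pvStepA (pvIsqrt p.length) p i) st)
      ((List.range p.length).map (fun _ => (0 : Int)),
       (List.range p.length).map (fun _ => ([] : List (Int × Int))))
    = (pvCells p p.length (pvIsqrt p.length)).foldl (pvStep (pvIsqrt p.length))
      ((List.range p.length).map (fun _ => (0 : Int)),
       (List.range p.length).map (fun _ => ([] : List (Int × Int)))) := by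
  have h1 : ∀ (st : List Int × List (List (Int × Int))) (i : Nat),
      (List.range p.length).foldl (pvStepA (pvIsqrt p.length) p i) st
        = ((List.range p.length).filterMap
            (fun j => if pvVal p i j = 0 then some (i, j) else none)).foldl
            (pvStep (pvIsqrt p.length)) st :=
    fun st i => foldl_if_filterMap (List.range p.length) (pvStep (pvIsqrt p.length))
      (fun j => pvVal p i j = 0) (fun j => (i, j)) st
  simp only [h1]
  rw [← foldl_flatMap']
  rfl

theorem main_block (p : List (List Int)) (b : Nat) :
    (List.range p.length).flatMap (fun i =>
      (List.range p.length).filterMap (fun j =>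
        if (p.getD i []).getD j 1 = 0 ∧
            (i / pvIsqrt p.length) * pvIsqrt p.length + j / pvIsqrt p.length = b
        then some ((i : Int), (j : Int)) else none))
    = ((pvCells p p.length (pvIsqrt p.length)).filter
        (fun c => decide (pvSg (pvIsqrt p.length) c = b))).map pvCast := by
  have hi : ∀ i : Nat,
      (List.range p.length).filterMap (fun j =>
        if (p.getD i []).getD j 1 = 0 ∧
            (i / pvIsqrt p.length) * pvIsqrt p.length + j / pvIsqrt p.length = b
        then some ((i : Int), (j : Int)) else none)
      = (((List.range p.length).filterMap
            (fun j => if pvVal p i j = 0 then some (i, j) else none)).filter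
          (fun c => decide (pvSg (pvIsqrt p.length) c = b))).map pvCast :=
    fun i => filterMap_if_and (List.range p.length) (fun j => pvVal p i j = 0)
      (fun c => pvSg (pvIsqrt p.length) c = b) (fun j => (i, j)) pvCast
  simp only [hi]
  rw [← map_filter_flatMap]
  rfl

theorem main_zi (p : List (List Int)) :
    (List.range p.length).map (fun b =>
      (List.range p.length).flatMap (fun i =>
        (List.range p.length).filterMap (fun j =>
          if (p.getD i []).getD j 1 = 0 ∧
              (i / pvIsqrt p.length) * pvIsqrt p.length + j / pvIsqrt p.length = b
          then some ((i : Int), (j : Int)) else none)))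
    = ((List.range p.length).foldl
        (fun st i => (List.range p.length).foldl (pvStepA (pvIsqrt p.length) p i) st)
        ((List.range p.length).map (fun _ => (0 : Int)),
         (List.range p.length).map (fun _ => ([] : List (Int × Int))))).2 := by
  rw [main_fold p]
  have hlen := pvFold_length (pvIsqrt p.length) (pvCells p p.length (pvIsqrt p.length))
    ((List.range p.length).map (fun _ => (0 : Int)),
     (List.range p.length).map (fun _ => ([] : List (Int × Int))))
  apply List.ext_getElem
  · simp only [List.length_map, List.length_range]
    rw [hlen.2]; simp
  · intro k h1 h2
    have hk : k < p.length := by simpa using h1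
    have hk1 : k < ((List.range p.length).map (fun _ => (0 : Int))).length := by simpa using hk
    have hk2 : k < ((List.range p.length).map
        (fun _ => ([] : List (Int × Int)))).length := by simpa using hk
    have hinv := (pvFold_inv (pvIsqrt p.length) (pvCells p p.length (pvIsqrt p.length))
      ((List.range p.length).map (fun _ => (0 : Int)))
      ((List.range p.length).map (fun _ => ([] : List (Int × Int)))) k hk1 hk2).2
    have hinit : ((List.range p.length).map
        (fun _ => ([] : List (Int × Int)))).getD k [] = [] := by
      simp [List.getD]
    rw [hinit] at hinv
    rw [List.getElem_map, List.getElem_range, main_block p k]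
    rw [← List.getD_eq_getElem _ [] h2, hinv]
    simp

theorem main_zc (p : List (List Int)) :
    (List.range p.length).foldl
      (fun zc i => if zc.getD i 0 = 0 then zc.set i ((p.length : Int) * (p.length : Int)) else zc)
      ((List.range p.length).foldl
        (fun st i => (List.range p.length).foldl (pvStepA (pvIsqrt p.length) p i) st)
        ((List.range p.length).map (fun _ => (0 : Int)),
         (List.range p.length).map (fun _ => ([] : List (Int × Int))))).1
    = ((List.range p.length).foldl
        (fun st i => (List.range p.length).foldl (pvStepA (pvIsqrt p.length) p i) st)
        ((List.range p.length).map (fun _ => (0 : Int)),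
         (List.range p.length).map (fun _ => ([] : List (Int × Int))))).2.map
        (fun cells => if cells = [] then (p.length : Int) * (p.length : Int)
          else (cells.length : Int)) := by
  rw [main_fold p]
  have hlen := pvFold_length (pvIsqrt p.length) (pvCells p p.length (pvIsqrt p.length))
    ((List.range p.length).map (fun _ => (0 : Int)),
     (List.range p.length).map (fun _ => ([] : List (Int × Int))))
  have hlen1 : ((pvCells p p.length (pvIsqrt p.length)).foldl (pvStep (pvIsqrt p.length))
      ((List.range p.length).map (fun _ => (0 : Int)),
       (List.range p.length).map (fun _ => ([] : List (Int × Int))))).1.length = p.length := by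
    rw [hlen.1]; simp
  have hlen2 : ((pvCells p p.length (pvIsqrt p.length)).foldl (pvStep (pvIsqrt p.length))
      ((List.range p.length).map (fun _ => (0 : Int)),
       (List.range p.length).map (fun _ => ([] : List (Int × Int))))).2.length = p.length := by
    rw [hlen.2]; simp
  apply List.ext_getElem
  · rw [pvPass2_length, hlen1, List.length_map, hlen2]
  · intro k h1 h2
    have hk : k < p.length := by
      rw [List.length_map, hlen2] at h2; exact h2
    have hk1 : k < ((List.range p.length).map (fun _ => (0 : Int))).length := by simpa using hk
    have hk2 : k < ((List.range p.length).map
        (fun _ => ([] : List (Int × Int)))).length := by simpa using hk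
    have hinv := pvFold_inv (pvIsqrt p.length) (pvCells p p.length (pvIsqrt p.length))
      ((List.range p.length).map (fun _ => (0 : Int)))
      ((List.range p.length).map (fun _ => ([] : List (Int × Int)))) k hk1 hk2
    have hinit1 : ((List.range p.length).map (fun _ => (0 : Int))).getD k 0 = 0 := by
      simp [List.getD]
    have hinit2 : ((List.range p.length).map
        (fun _ => ([] : List (Int × Int)))).getD k [] = [] := by
      simp [List.getD]
    rw [hinit1] at hinv
    rw [hinit2] at hinv
    have hfilterlen := hinv.1
    have hfiltermap := hinv.2
    rw [← List.getD_eq_getElem _ 0 h1]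
    rw [pvPass2_getD _ _ _ k (by rwa [hlen1]), hfilterlen]
    rw [List.getElem_map, ← List.getD_eq_getElem _ [] (by rwa [hlen2]), hfiltermap]
    by_cases hfe : (pvCells p p.length (pvIsqrt p.length)).filter
        (fun c => decide (pvSg (pvIsqrt p.length) c = k)) = []
    · simp [hfe, hk]
    · have hpos : 0 < ((pvCells p p.length (pvIsqrt p.length)).filter
          (fun c => decide (pvSg (pvIsqrt p.length) c = k))).length :=
        List.length_pos_iff.mpr hfe
      rw [if_neg (fun hc => by omega), if_neg (by simpa [List.map_eq_nil_iff] using hfe)]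
      simp

-- ===== VERDICT (by name: the statement is the Claim_ definition above) =====
theorem sub_grid_heuristic_spec : Claim_equal_sub_grid_heuristic := by
  intro p _ _
  unfold Spec_sub_grid_heuristic
  simp only [sub_grid_heuristic, sub_grid_heuristic_alt]
  rw [main_zi p, main_zc p]
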